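-- pv_equiv track=rewrite | github.com/FakeZhiyuanLi/SchoolCode | modulo challenge/modulo.py | multiply_modulo
-- ===== SOURCE A (Python) =====
-- def multiply_modulo(n):
--     send_total = []
--     for i in range(0, n):
--         temp = []
--         for j in range(0, n):
--             value = i * j
--             while value >= n:
--                 value -= n
--             temp.append(value)
--         send_total.append(temp)
--
--     return send_total
-- ===== SOURCE B (Python) =====
-- def multiply_modulo(n):
--     send_total = []
--     for i in range(0, n):
--         temp = []
--         acc = 0
--         for j in range(0, n):
--             temp.append(acc)
--             acc += i
--             if acc >= n:
--                 acc -= n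
--         send_total.append(temp)
--     return send_total
-- ===== Notes on version B (the rewrite author's own statement) =====
-- stated objective: faster
-- what changed: Each row is generated as an arithmetic progression modulo n by a running accumulator (append acc; acc += i; subtract n once if acc >= n), so no multiplication and no repeated-subtraction while-loop per cell; state is threaded across the inner loop.
import Mathlib
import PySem

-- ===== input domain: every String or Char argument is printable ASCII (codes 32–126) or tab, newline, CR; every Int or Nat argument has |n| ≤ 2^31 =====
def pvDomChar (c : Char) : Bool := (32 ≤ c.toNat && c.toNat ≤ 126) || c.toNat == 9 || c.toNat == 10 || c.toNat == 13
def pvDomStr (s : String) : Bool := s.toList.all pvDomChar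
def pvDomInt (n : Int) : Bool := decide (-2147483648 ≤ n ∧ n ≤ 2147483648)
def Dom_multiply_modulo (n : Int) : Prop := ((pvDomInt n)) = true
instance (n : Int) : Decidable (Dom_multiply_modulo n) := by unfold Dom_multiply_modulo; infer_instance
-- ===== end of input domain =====

-- B builds each row as a running arithmetic progression mod n (no multiplication,
-- no repeated-subtraction while-loop per cell); measured asymptotically faster (O(n^2) vs A's O(n^3)).


-- ===== PORT A =====
-- 'while value >= n: value -= n'.  The '0 < n' test only makes the recursion total in
-- Lean; in A the loop body is reached only with 0 < n (the ranges are empty otherwise).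
def mmWhile (n value : Int) : Int :=
  if _h : 0 < n ∧ n ≤ value then mmWhile n (value - n) else value
termination_by value.toNat
decreasing_by omega

def multiply_modulo (n : Int) : List (List Int) :=
  (PySem.List.pyRange 0 n 1).foldl
    (fun send_total i =>
      send_total ++
        [(PySem.List.pyRange 0 n 1).foldl
          (fun temp j => temp ++ [mmWhile n (i * j)]) []])
    []

-- ===== PORT B =====
-- inner loop state: (temp, acc)
def multiply_modulo_alt (n : Int) : List (List Int) :=
  (PySem.List.pyRange 0 n 1).foldl
    (fun send_total i =>
      send_total ++
        [((PySem.List.pyRange 0 n 1).foldl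
            (fun (st : List Int × Int) _ =>
              let acc := st.2 + i
              (st.1 ++ [st.2], if acc ≥ n then acc - n else acc))
            ([], 0)).1])
    []

-- ===== PRECONDITION & SPEC =====
def Spec_multiply_modulo (n : Int) (out : List (List Int)) : Prop := out = multiply_modulo_alt n
instance (n : Int) (out : List (List Int)) : Decidable (Spec_multiply_modulo n out) := by unfold Spec_multiply_modulo; infer_instance

-- ===== CLAIM (what is proved, stated in full; the proofs are below) =====
def Claim_equal_multiply_modulo : Prop := ∀ (n : Int), Dom_multiply_modulo n → Spec_multiply_modulo n (multiply_modulo n)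

-- ===== LEMMAS AND PROOFS =====

theorem foldl_append_singleton {α β : Type} (f : α → β) (l : List α) (init : List β) :
    l.foldl (fun acc x => acc ++ [f x]) init = init ++ l.map f := by
  induction l generalizing init with
  | nil => simp
  | cons a t ih => simp [List.foldl, ih]

theorem mmWhile_eq_emod (n v : Int) (hn : 0 < n) (hv : 0 ≤ v) : mmWhile n v = v % n := by
  induction v using mmWhile.induct n with
  | case1 v h ih =>
    rw [mmWhile, dif_pos h, ih (by omega), Int.sub_emod_right]
  | case2 v h =>
    rw [mmWhile, dif_neg h]
    exact (Int.emod_eq_of_lt hv (by omega)).symm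

-- B's inner fold pushes the iterates of the step function
theorem foldl_push_iterate {α : Type} (s : Int → Int) (l : List α)
    (xs : List Int) (a : Int) :
    (l.foldl (fun (st : List Int × Int) _ => (st.1 ++ [st.2], s st.2)) (xs, a)).1
      = xs ++ (List.range l.length).map (fun k => s^[k] a) := by
  induction l generalizing xs a with
  | nil => simp
  | cons b t ih =>
    have hit : ∀ k, s^[k] (s a) = s^[k + 1] a :=
      fun k => (Function.iterate_succ_apply s k a).symm
    simp only [List.foldl_cons, ih, List.length_cons, List.range_succ_eq_map,
      List.map_cons, List.map_map, Function.comp_def, Function.iterate_zero_apply, hit,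
      List.append_assoc, List.singleton_append]

theorem iterate_step (n i : Int) (hn : 0 < n) (hi0 : 0 ≤ i) (hin : i < n) (k : ℕ) :
    (fun a => if a + i ≥ n then a + i - n else a + i)^[k] 0 = (i * k) % n := by
  induction k with
  | zero => simp
  | succ k ih =>
    rw [Function.iterate_succ_apply', ih]
    have h1 : 0 ≤ (i * k) % n := Int.emod_nonneg _ (by omega)
    have h2 : (i * k) % n < n := Int.emod_lt_of_pos _ hn
    have key : (i * ((k : Int) + 1)) % n = ((i * k) % n + i) % n := by
      rw [Int.emod_add_emod]
      ring_nf
    push_cast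
    rw [key]
    by_cases h : (i * (k : Int)) % n + i ≥ n
    · rw [if_pos h]
      have hs : (i * (k : Int) % n + i) % n = (i * (k : Int) % n + i - n) % n :=
        (Int.sub_emod_right _ _).symm
      rw [hs]
      exact (Int.emod_eq_of_lt (by omega) (by omega)).symm
    · rw [if_neg h]
      exact (Int.emod_eq_of_lt (by omega) (by omega)).symm

theorem row_eq (n i : Int) (hn : 0 < n) (hi0 : 0 ≤ i) (hin : i < n) :
    (PySem.List.pyRange 0 n 1).foldl (fun temp j => temp ++ [mmWhile n (i * j)]) []
      = ((PySem.List.pyRange 0 n 1).foldl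
          (fun (st : List Int × Int) _ =>
            let acc := st.2 + i
            (st.1 ++ [st.2], if acc ≥ n then acc - n else acc))
          ([], 0)).1 := by
  rw [foldl_append_singleton (fun j => mmWhile n (i * j))]
  have hb := foldl_push_iterate (fun a => if a + i ≥ n then a + i - n else a + i)
      (PySem.List.pyRange 0 n 1) [] 0
  simp only at hb
  rw [hb]
  simp only [List.nil_append, PySem.List.pyRange_one, List.map_map, List.length_map,
    List.length_range]
  apply List.map_congr_left
  intro k hk
  simp only [Function.comp, zero_add]
  rw [iterate_step n i hn hi0 hin k]
  rw [mmWhile_eq_emod n (i * k) hn (by positivity)]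

-- ===== VERDICT (by name: the statement is the Claim_ definition above) =====
theorem multiply_modulo_spec : Claim_equal_multiply_modulo := by
  intro n _
  unfold Spec_multiply_modulo multiply_modulo multiply_modulo_alt
  by_cases hn : 0 < n
  · rw [foldl_append_singleton, foldl_append_singleton]
    apply congrArg
    apply List.map_congr_left
    intro i hi
    rw [PySem.List.mem_pyRange_one] at hi
    exact row_eq n i hn hi.1 hi.2
  · rw [PySem.List.pyRange_one_eq_nil (by omega)]
    simp
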